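-- pv_equiv track=rewrite | github.com/tmkinnear/MoodleQuizGenerator | generator.py | question_select_option
-- ===== SOURCE A (Python) =====
-- def question_select_option(nums,opt_sets):
-- 	outtext = ""
-- 	text = """
--     <selectoption>
--       <text>{0:s}</text>
--       <group>{1:d}</group>
--     </selectoption>
-- 	"""
-- 	for num in range(nums):
-- 		opts = opt_sets[num].split(',')
-- 		for opt in [opts[0]]:
-- 			outtext+=text.format(opt,num+1)
-- 	for num in range(nums):
-- 		opts = opt_sets[num].split(',')
-- 		for opt in opts[1:]:
-- 			outtext+=text.format(opt,num+1)
-- 	return outtext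
-- ===== SOURCE B (Python) =====
-- def question_select_option(nums, opt_sets):
-- 	text = """
--     <selectoption>
--       <text>{0:s}</text>
--       <group>{1:d}</group>
--     </selectoption>
-- 	"""
-- 	firsts = ""
-- 	rests = ""
-- 	for num in range(nums):
-- 		opts = opt_sets[num].split(',')
-- 		firsts += text.format(opts[0], num + 1)
-- 		for opt in opts[1:]:
-- 			rests += text.format(opt, num + 1)
-- 	return firsts + rests
-- ===== Notes on version B (the rewrite author's own statement) =====
-- stated objective: alternative
-- what changed: Replaces A's two separate passes over range(nums) (each re-splitting every option set) with one pass that splits each set once and maintains two string buffers (firsts, rests), concatenated at the end.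
import Mathlib
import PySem

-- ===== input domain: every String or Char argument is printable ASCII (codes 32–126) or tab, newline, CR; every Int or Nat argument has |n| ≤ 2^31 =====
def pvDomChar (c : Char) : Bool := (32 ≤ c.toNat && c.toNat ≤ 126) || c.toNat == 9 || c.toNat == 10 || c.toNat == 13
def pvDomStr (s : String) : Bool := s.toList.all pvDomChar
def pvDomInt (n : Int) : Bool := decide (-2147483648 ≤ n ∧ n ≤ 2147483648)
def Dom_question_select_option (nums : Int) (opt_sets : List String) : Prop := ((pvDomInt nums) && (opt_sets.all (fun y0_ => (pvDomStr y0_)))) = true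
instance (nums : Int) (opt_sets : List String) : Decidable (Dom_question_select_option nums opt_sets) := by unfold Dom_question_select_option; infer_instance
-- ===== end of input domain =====

-- B does one pass with two buffers (firsts, rests) instead of A's two passes; return value equivalence only.

-- ===== PORT A =====
-- s.split(','): sep is non-empty, so PySem.Str.split? always returns some (exact; getD [] never fires).
def pvSplit (s : String) : List String := (PySem.Str.split? s ",").getD []

-- text.format(opt, num+1): placeholder substitution into the fixed template, hand-ported (exact:
-- the format fields appear only in the template, the arguments are inserted verbatim).
def pvFmt (opt : String) (g : Int) : String :=
  "\n    <selectoption>\n      <text>" ++ opt ++ "</text>\n      <group>" ++ PySem.Int.toStr g ++ "</group>\n    </selectoption>\n\t"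

def question_select_option (nums : Int) (opt_sets : List String) : String :=
  -- first loop: for num in range(nums): opts = split; for opt in [opts[0]]: outtext += …
  let out1 := (PySem.List.pyRange 0 nums 1).foldl (fun acc num =>
    let opts := pvSplit (PySem.List.pyGetD opt_sets num "")
    [PySem.List.pyGetD opts 0 ""].foldl (fun a opt => a ++ pvFmt opt (num + 1)) acc) ""
  -- second loop: for num in range(nums): opts = split; for opt in opts[1:]: outtext += …
  (PySem.List.pyRange 0 nums 1).foldl (fun acc num =>
    let opts := pvSplit (PySem.List.pyGetD opt_sets num "")
    (PySem.List.slice opts (some 1) none).foldl (fun a opt => a ++ pvFmt opt (num + 1)) acc) out1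

-- ===== PORT B =====
def question_select_option_alt (nums : Int) (opt_sets : List String) : String :=
  let p := (PySem.List.pyRange 0 nums 1).foldl (fun (p : String × String) num =>
    let opts := pvSplit (PySem.List.pyGetD opt_sets num "")
    (p.1 ++ pvFmt (PySem.List.pyGetD opts 0 "") (num + 1),
     (PySem.List.slice opts (some 1) none).foldl (fun a opt => a ++ pvFmt opt (num + 1)) p.2)) ("", "")
  p.1 ++ p.2

-- ===== PRECONDITION & SPEC =====
-- A (and B) raise IndexError when nums exceeds len(opt_sets); Pre_ excludes exactly those inputs.
def Pre_question_select_option (nums : Int) (opt_sets : List String) : Prop :=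
  nums ≤ (opt_sets.length : Int)
instance (nums : Int) (opt_sets : List String) : Decidable (Pre_question_select_option nums opt_sets) := by unfold Pre_question_select_option; infer_instance
def pvWitness_question_select_option : Int × List String := (2, ["a,b", "c"])
def Spec_question_select_option (nums : Int) (opt_sets : List String) (out : String) : Prop := out = question_select_option_alt nums opt_sets
instance (nums : Int) (opt_sets : List String) (out : String) : Decidable (Spec_question_select_option nums opt_sets out) := by unfold Spec_question_select_option; infer_instance

-- ===== CLAIM (what is proved, stated in full; the proofs are below) =====
def Claim_equal_question_select_option : Prop := ∀ (nums : Int) (opt_sets : List String), Dom_question_select_option nums opt_sets → Pre_question_select_option nums opt_sets → Spec_question_select_option nums opt_sets (question_select_option nums opt_sets)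

-- ===== LEMMAS AND PROOFS =====

-- pulling the accumulator out of a "acc ++ f x" foldl
theorem pv_foldl_shift (f : Int → String) (l : List Int) (a : String) :
    l.foldl (fun acc n => acc ++ f n) a = a ++ l.foldl (fun acc n => acc ++ f n) "" := by
  induction l generalizing a with
  | nil => simp
  | cons x xs ih =>
    simp only [List.foldl_cons]
    rw [ih, ih ("" ++ f x)]
    simp [String.append_assoc]

theorem pv_foldl_shift_str (g : Int → List String) (n : Int) (a : String) :
    (g n).foldl (fun acc s => acc ++ pvFmt s (n + 1)) a
      = a ++ (g n).foldl (fun acc s => acc ++ pvFmt s (n + 1)) "" := by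
  induction g n generalizing a with
  | nil => simp
  | cons x xs ih =>
    simp only [List.foldl_cons]
    rw [ih, ih ("" ++ pvFmt x (n + 1))]
    simp [String.append_assoc]

-- B's pair foldl computes (firsts-concat, rests-concat)
theorem pv_pair_foldl (F G : Int → String) (l : List Int) (a b : String) :
    l.foldl (fun (p : String × String) n => (p.1 ++ F n, p.2 ++ G n)) (a, b)
      = (l.foldl (fun acc n => acc ++ F n) a, l.foldl (fun acc n => acc ++ G n) b) := by
  induction l generalizing a b with
  | nil => rfl
  | cons x xs ih => simp only [List.foldl_cons]; exact ih _ _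

-- ===== VERDICT (by name: the statement is the Claim_ definition above) =====
theorem question_select_option_spec : Claim_equal_question_select_option := by
  intro nums opt_sets _ _
  unfold Spec_question_select_option question_select_option question_select_option_alt
  set F : Int → String := fun num =>
    pvFmt (PySem.List.pyGetD (pvSplit (PySem.List.pyGetD opt_sets num "")) 0 "") (num + 1) with hF
  set G : Int → String := fun num =>
    (PySem.List.slice (pvSplit (PySem.List.pyGetD opt_sets num "")) (some 1) none).foldl
      (fun a opt => a ++ pvFmt opt (num + 1)) "" with hG
  have hA1 : ∀ (acc : String) (num : Int),
      [PySem.List.pyGetD (pvSplit (PySem.List.pyGetD opt_sets num "")) 0 ""].foldl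
          (fun a opt => a ++ pvFmt opt (num + 1)) acc = acc ++ F num := by
    intro acc num; simp [hF]
  have hA2 : ∀ (acc : String) (num : Int),
      (PySem.List.slice (pvSplit (PySem.List.pyGetD opt_sets num "")) (some 1) none).foldl
          (fun a opt => a ++ pvFmt opt (num + 1)) acc = acc ++ G num := by
    intro acc num
    exact (pv_foldl_shift_str
      (fun n => PySem.List.slice (pvSplit (PySem.List.pyGetD opt_sets n "")) (some 1) none)
      num acc)
  simp only [hA1, hA2]
  rw [pv_pair_foldl F G (PySem.List.pyRange 0 nums 1) "" ""]
  simp only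
  rw [pv_foldl_shift G (PySem.List.pyRange 0 nums 1)
    ((PySem.List.pyRange 0 nums 1).foldl (fun acc n => acc ++ F n) "")]
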